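-- pv_equiv track=rewrite | github.com/Sebastia1111/ValidarMisDatos | ejercicio Git.py | validar_texto
-- ===== SOURCE A (Python) =====
-- def validar_texto(texto):
--     if texto == '':
--         return False # si no tiene nada -> False
--     for i in texto:
--         if i >= 'A' and i <= 'Z': # Acepta mayusculas
--             continue
--         if i >= 'a' and i <= 'z': # Acepta minusculas
--             continue
--         return False # si no es letra -> False
--     return True
-- ===== SOURCE B (Python) =====
-- import re
--
-- def validar_texto(texto):
--     return bool(re.fullmatch(r'[A-Za-z]+', texto))
-- ===== Notes on version B (the rewrite author's own statement) =====
-- stated objective: idiomatic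
-- what changed: Replaced the explicit per-character loop with range comparisons and early return by a single regex fullmatch of [A-Za-z]+, which also subsumes the empty-string check.
import Mathlib
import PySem

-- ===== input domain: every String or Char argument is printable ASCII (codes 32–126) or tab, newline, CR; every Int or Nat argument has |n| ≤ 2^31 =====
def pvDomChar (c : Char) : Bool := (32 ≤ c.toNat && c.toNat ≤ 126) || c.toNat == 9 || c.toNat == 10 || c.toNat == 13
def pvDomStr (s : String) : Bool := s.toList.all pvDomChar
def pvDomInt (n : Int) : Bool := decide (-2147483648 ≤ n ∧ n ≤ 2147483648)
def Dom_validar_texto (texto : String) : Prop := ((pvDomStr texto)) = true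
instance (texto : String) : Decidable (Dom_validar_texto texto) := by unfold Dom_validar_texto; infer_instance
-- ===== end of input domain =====

-- B replaces A's explicit per-character loop (range checks + early return) with one regex
-- fullmatch of [A-Za-z]+ (idiomatic), ported as nonempty ∧ all-chars-ASCII-letter.

-- ===== PORT A =====
-- literal port of A: empty check, then a left-to-right loop with early return False
def validarLoopA : List Char → Bool
  | [] => true
  | c :: rest =>
    if 'A' ≤ c ∧ c ≤ 'Z' then validarLoopA rest
    else if 'a' ≤ c ∧ c ≤ 'z' then validarLoopA rest
    else false

def validar_texto (texto : String) : Bool :=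
  if texto = "" then false
  else validarLoopA texto.toList

-- ===== PORT B =====
-- re.fullmatch(r'[A-Za-z]+', texto): nonempty and every char an ASCII letter
def validar_texto_alt (texto : String) : Bool :=
  texto.toList ≠ [] && texto.toList.all Char.isAlpha

-- ===== PRECONDITION & SPEC =====
def Spec_validar_texto (texto : String) (out : Bool) : Prop := out = validar_texto_alt texto
instance (texto : String) (out : Bool) : Decidable (Spec_validar_texto texto out) := by unfold Spec_validar_texto; infer_instance

-- ===== CLAIM (what is proved, stated in full; the proofs are below) =====
def Claim_equal_validar_texto : Prop := ∀ (texto : String), Dom_validar_texto texto → Spec_validar_texto texto (validar_texto texto)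

-- ===== LEMMAS AND PROOFS =====

theorem validarLoopA_eq_all (l : List Char) : validarLoopA l = l.all Char.isAlpha := by
  induction l with
  | nil => rfl
  | cons c rest ih =>
    simp only [validarLoopA, List.all_cons]
    by_cases h1 : 'A' ≤ c ∧ c ≤ 'Z'
    · simp only [if_pos h1, ih]
      have hc : c.isAlpha = true := by
        simp [Char.isAlpha, Char.isUpper, Char.le_def, UInt32.le_iff_toNat_le] at *
        omega
      simp [hc]
    · simp only [if_neg h1]
      by_cases h2 : 'a' ≤ c ∧ c ≤ 'z'
      · simp only [if_pos h2, ih]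
        have hc : c.isAlpha = true := by
          simp [Char.isAlpha, Char.isLower, Char.le_def, UInt32.le_iff_toNat_le] at *
          omega
        simp [hc]
      · simp only [if_neg h2]
        have hc : c.isAlpha = false := by
          simp [Char.isAlpha, Char.isUpper, Char.isLower, Char.le_def, UInt32.le_iff_toNat_le] at *
          omega
        simp [hc]

-- ===== VERDICT (by name: the statement is the Claim_ definition above) =====
theorem validar_texto_spec : Claim_equal_validar_texto := by
  intro texto _
  unfold Spec_validar_texto validar_texto validar_texto_alt
  by_cases h : texto = ""
  · subst h; rfl
  · have hl : texto.toList ≠ [] := by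
      simpa [String.toList_eq_nil_iff] using h
    simp [h, hl, validarLoopA_eq_all]
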